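-- pv_equiv track=rewrite | github.com/adambyle/atomic2026 | bots/jacob/oracle_greedy_bot.py | score_maki_for_player
-- ===== SOURCE A (Python) =====
-- def score_maki_for_player(my_maki: int, all_maki: list, player_count: int) -> int:
--     """Compute maki score for a single player given all players' maki totals."""
--     if all(m == 0 for m in all_maki):
--         return 0
--     first_pts = 4 if player_count == 2 else 6
--     second_pts = 2 if player_count == 2 else 3
--     sorted_unique = sorted(set(all_maki), reverse=True)
--     first_val = sorted_unique[0]
--     first_tiers = [m for m in all_maki if m == first_val]
--     if my_maki == first_val:
--         return first_pts // len(first_tiers)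
--     if len(sorted_unique) > 1:
--         second_val = sorted_unique[1]
--         second_tiers = [m for m in all_maki if m == second_val]
--         if my_maki == second_val:
--             return second_pts // len(second_tiers)
--     return 0
-- ===== SOURCE B (Python) =====
-- def score_maki_for_player(my_maki: int, all_maki: list, player_count: int) -> int:
--     """Compute maki score for a single player given all players' maki totals."""
--     # One pass: track the maximum (hi) and the largest value strictly below it (lo),
--     # with occurrence counts, plus whether any value is nonzero.
--     hi = lo = None
--     hi_n = lo_n = 0
--     nonzero = False
--     for m in all_maki:
--         if m != 0:
--             nonzero = True
--         if hi is None or m > hi: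
--             lo, lo_n = hi, hi_n
--             hi, hi_n = m, 1
--         elif m == hi:
--             hi_n += 1
--         elif lo is None or m > lo:
--             lo, lo_n = m, 1
--         elif m == lo:
--             lo_n += 1
--     if not nonzero:
--         return 0
--     first_pts = 4 if player_count == 2 else 6
--     second_pts = 2 if player_count == 2 else 3
--     if my_maki == hi:
--         return first_pts // hi_n
--     if lo is not None and my_maki == lo:
--         return second_pts // lo_n
--     return 0
-- ===== Notes on version B (the rewrite author's own statement) =====
-- stated objective: faster
-- what changed: Replaced building a set, sorting it descending and filtering the list twice with one linear pass that maintains the maximum, the largest value strictly below it, and their occurrence counts.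
import Mathlib
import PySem

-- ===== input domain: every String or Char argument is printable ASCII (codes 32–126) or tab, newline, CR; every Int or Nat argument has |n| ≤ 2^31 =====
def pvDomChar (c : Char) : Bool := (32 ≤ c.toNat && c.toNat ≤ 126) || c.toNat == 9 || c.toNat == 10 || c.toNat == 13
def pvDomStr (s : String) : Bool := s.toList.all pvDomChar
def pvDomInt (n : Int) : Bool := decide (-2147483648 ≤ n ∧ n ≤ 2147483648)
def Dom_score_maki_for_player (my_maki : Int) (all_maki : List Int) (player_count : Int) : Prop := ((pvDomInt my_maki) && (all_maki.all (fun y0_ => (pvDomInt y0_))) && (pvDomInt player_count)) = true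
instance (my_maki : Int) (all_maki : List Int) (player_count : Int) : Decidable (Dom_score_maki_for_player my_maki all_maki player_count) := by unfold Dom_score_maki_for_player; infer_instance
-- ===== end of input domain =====

-- B replaces A's set+descending-sort+filter approach by a single pass tracking the maximum,
-- the largest value strictly below it, and their occurrence counts (asymptotically faster).


-- ===== PORT A =====
def score_maki_for_player (my_maki : Int) (all_maki : List Int) (player_count : Int) : Int :=
  if all_maki.all (fun m => m == 0) then 0
  else
    let first_pts : Int := if player_count == 2 then 4 else 6
    let second_pts : Int := if player_count == 2 then 2 else 3
    let sorted_unique := PySem.List.sorted (PySem.Set.ofList all_maki) (fun x => x) true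
    match sorted_unique with
    | [] => 0  -- unreachable: the all-zero guard already returned on the empty list
    | first_val :: rest =>
      let first_tiers := all_maki.filter (fun m => m == first_val)
      if my_maki == first_val then PySem.Int.floordiv first_pts (first_tiers.length : Int)
      else
        match rest with  -- Python: if len(sorted_unique) > 1: second_val = sorted_unique[1]
        | [] => 0
        | second_val :: _ =>
          let second_tiers := all_maki.filter (fun m => m == second_val)
          if my_maki == second_val then PySem.Int.floordiv second_pts (second_tiers.length : Int)
          else 0

-- ===== PORT B =====
-- fold state: (hi, hi_n, lo, lo_n, nonzero)
def pvAltStep (st : Option Int × Int × Option Int × Int × Bool) (m : Int) :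
    Option Int × Int × Option Int × Int × Bool :=
  let (hi, hi_n, lo, lo_n, nz) := st
  let nz := if m != 0 then true else nz
  match hi with
  | none => (some m, 1, hi, hi_n, nz)
  | some h =>
    if m > h then (some m, 1, some h, hi_n, nz)
    else if m == h then (some h, hi_n + 1, lo, lo_n, nz)
    else
      match lo with
      | none => (some h, hi_n, some m, 1, nz)
      | some l =>
        if m > l then (some h, hi_n, some m, 1, nz)
        else if m == l then (some h, hi_n, some l, lo_n + 1, nz)
        else (some h, hi_n, some l, lo_n, nz)

def score_maki_for_player_alt (my_maki : Int) (all_maki : List Int) (player_count : Int) : Int :=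
  let st := all_maki.foldl pvAltStep (none, 0, none, 0, false)
  match st with
  | (hi, hi_n, lo, lo_n, nz) =>
    if !nz then 0
    else
      let first_pts : Int := if player_count == 2 then 4 else 6
      let second_pts : Int := if player_count == 2 then 2 else 3
      match hi with
      | none => 0  -- unreachable: nz implies the list is nonempty
      | some h =>
        if my_maki == h then PySem.Int.floordiv first_pts hi_n
        else
          match lo with
          | none => 0
          | some l => if my_maki == l then PySem.Int.floordiv second_pts lo_n else 0

-- ===== PRECONDITION & SPEC =====
def Spec_score_maki_for_player (my_maki : Int) (all_maki : List Int) (player_count : Int) (out : Int) : Prop := out = score_maki_for_player_alt my_maki all_maki player_count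
instance (my_maki : Int) (all_maki : List Int) (player_count : Int) (out : Int) : Decidable (Spec_score_maki_for_player my_maki all_maki player_count out) := by unfold Spec_score_maki_for_player; infer_instance

-- ===== CLAIM (what is proved, stated in full; the proofs are below) =====
def Claim_equal_score_maki_for_player : Prop := ∀ (my_maki : Int) (all_maki : List Int) (player_count : Int), Dom_score_maki_for_player my_maki all_maki player_count → Spec_score_maki_for_player my_maki all_maki player_count (score_maki_for_player my_maki all_maki player_count)

-- ===== LEMMAS AND PROOFS =====

-- invariant of B's fold over a nonempty list: hi is the maximum with its count,
-- lo the largest value strictly below it with its count, nz the any-nonzero flag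
def pvInv (xs : List Int) (st : Option Int × Int × Option Int × Int × Bool) : Prop :=
  ∃ H hn lo ln nz, st = (some H, hn, lo, ln, nz) ∧
    H ∈ xs ∧ (∀ y ∈ xs, y ≤ H) ∧ hn = (xs.count H : Int) ∧
    (match lo with
     | none => ∀ y ∈ xs, ¬ y < H
     | some L => L ∈ xs ∧ L < H ∧ (∀ y ∈ xs, y < H → y ≤ L) ∧ ln = (xs.count L : Int)) ∧
    nz = xs.any (fun m => !(m == 0))

theorem pv_fold_inv (xs : List Int) (hne : xs ≠ []) :
    pvInv xs (xs.foldl pvAltStep (none, 0, none, 0, false)) := by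
  induction xs using List.reverseRecOn with
  | nil => exact absurd rfl hne
  | append_singleton ys a ih =>
    rw [List.foldl_append]
    rcases eq_or_ne ys [] with hys | hys
    · subst hys
      refine ⟨a, 1, none, 0, if a != 0 then true else false, rfl, ?_, ?_, ?_, ?_, ?_⟩
      · simp
      · intro y hy; simp at hy; omega
      · simp
      · intro y hy; simp at hy; omega
      · by_cases h0 : a = 0 <;> simp [h0]
    · obtain ⟨H, hn, lo, ln, nz, hst, hH, hmax, hcnt, hlo, hnz⟩ := ih hys
      have nzeq : (if a != 0 then true else nz) = (ys ++ [a]).any (fun m => !(m == 0)) := by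
        by_cases h0 : a = 0 <;> simp [h0, hnz]
      rw [hst]
      simp only [List.foldl_cons, List.foldl_nil]
      unfold pvAltStep
      dsimp only
      by_cases hgt : a > H
      · rw [if_pos hgt]
        have hnotmem : a ∉ ys := fun hm => absurd (hmax a hm) (by omega)
        refine ⟨a, 1, some H, hn, _, rfl, by simp, ?_, ?_, ?_, nzeq⟩
        · intro y hy; rcases List.mem_append.1 hy with h' | h'
          · have := hmax y h'; omega
          · simp at h'; omega
        · rw [List.count_append, List.count_eq_zero_of_not_mem hnotmem]
          simp
        · refine ⟨List.mem_append_left _ hH, hgt, ?_, ?_⟩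
          · intro y hy hlt; rcases List.mem_append.1 hy with h' | h'
            · exact hmax y h'
            · simp at h'; omega
          · have hHa : H ∉ [a] := by intro hm; simp at hm; omega
            rw [List.count_append, List.count_eq_zero_of_not_mem hHa, hcnt]
            simp
      · rw [if_neg hgt]
        by_cases heq : a = H
        · rw [if_pos (by simp [heq])]
          refine ⟨H, hn + 1, lo, ln, _, rfl, List.mem_append_left _ hH, ?_, ?_, ?_, nzeq⟩
          · intro y hy; rcases List.mem_append.1 hy with h' | h'
            · exact hmax y h'
            · simp at h'; omega
          · rw [List.count_append, heq, hcnt]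
            simp
          · match lo, hlo with
            | none, hlo =>
              intro y hy; rcases List.mem_append.1 hy with h' | h'
              · exact hlo y h'
              · simp at h'; omega
            | some L, ⟨hL, hLlt, hLmax, hLcnt⟩ =>
              refine ⟨List.mem_append_left _ hL, hLlt, ?_, ?_⟩
              · intro y hy hlt; rcases List.mem_append.1 hy with h' | h'
                · exact hLmax y h' hlt
                · simp at h'; omega
              · have hLa : L ∉ [a] := by intro hm; simp at hm; omega
                rw [List.count_append, List.count_eq_zero_of_not_mem hLa, hLcnt]
                simp
        · rw [if_neg (by simp [heq])]
          have hlt : a < H := by omega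
          have hHa : H ∉ [a] := by intro hm; simp at hm; omega
          match lo, hlo with
          | none, hlo =>
            have hanot : a ∉ ys := fun hm => absurd hlt (hlo a hm)
            refine ⟨H, hn, some a, 1, _, rfl, List.mem_append_left _ hH, ?_, ?_, ?_, nzeq⟩
            · intro y hy; rcases List.mem_append.1 hy with h' | h'
              · exact hmax y h'
              · simp at h'; omega
            · rw [List.count_append, List.count_eq_zero_of_not_mem hHa, hcnt]; simp
            · refine ⟨by simp, hlt, ?_, ?_⟩
              · intro y hy hylt; rcases List.mem_append.1 hy with h' | h'
                · exact absurd hylt (hlo y h')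
                · simp at h'; omega
              · rw [List.count_append, List.count_eq_zero_of_not_mem hanot]
                simp
          | some L, ⟨hL, hLlt, hLmax, hLcnt⟩ =>
            dsimp only
            by_cases hgt2 : a > L
            · rw [if_pos hgt2]
              have hanot : a ∉ ys := fun hm => absurd (hLmax a hm hlt) (by omega)
              refine ⟨H, hn, some a, 1, _, rfl, List.mem_append_left _ hH, ?_, ?_, ?_, nzeq⟩
              · intro y hy; rcases List.mem_append.1 hy with h' | h'
                · exact hmax y h'
                · simp at h'; omega
              · rw [List.count_append, List.count_eq_zero_of_not_mem hHa, hcnt]; simp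
              · refine ⟨by simp, hlt, ?_, ?_⟩
                · intro y hy hylt; rcases List.mem_append.1 hy with h' | h'
                  · have := hLmax y h' hylt; omega
                  · simp at h'; omega
                · rw [List.count_append, List.count_eq_zero_of_not_mem hanot]
                  simp
            · rw [if_neg hgt2]
              by_cases heq2 : a = L
              · rw [if_pos (by simp [heq2])]
                refine ⟨H, hn, some L, ln + 1, _, rfl, List.mem_append_left _ hH, ?_, ?_, ?_, nzeq⟩
                · intro y hy; rcases List.mem_append.1 hy with h' | h'
                  · exact hmax y h'
                  · simp at h'; omega
                · rw [List.count_append, List.count_eq_zero_of_not_mem hHa, hcnt]; simp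
                · refine ⟨List.mem_append_left _ hL, hLlt, ?_, ?_⟩
                  · intro y hy hylt; rcases List.mem_append.1 hy with h' | h'
                    · exact hLmax y h' hylt
                    · simp at h'; omega
                  · rw [List.count_append, heq2, hLcnt]
                    simp
              · rw [if_neg (by simp [heq2])]
                have hLa : L ∉ [a] := by intro hm; simp at hm; omega
                refine ⟨H, hn, some L, ln, _, rfl, List.mem_append_left _ hH, ?_, ?_, ?_, nzeq⟩
                · intro y hy; rcases List.mem_append.1 hy with h' | h'
                  · exact hmax y h'
                  · simp at h'; omega
                · rw [List.count_append, List.count_eq_zero_of_not_mem hHa, hcnt]; simp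
                · refine ⟨List.mem_append_left _ hL, hLlt, ?_, ?_⟩
                  · intro y hy hylt; rcases List.mem_append.1 hy with h' | h'
                    · exact hLmax y h' hylt
                    · simp at h'; omega
                  · rw [List.count_append, List.count_eq_zero_of_not_mem hLa, hLcnt]; simp

-- A-side: the head of sorted(set(xs), reverse=True) is the maximum …
theorem pv_sorted_head (xs : List Int) (h : Int) (t : List Int)
    (hs : PySem.List.sorted (PySem.Set.ofList xs) (fun x => x) true = h :: t) :
    h ∈ xs ∧ ∀ y ∈ xs, y ≤ h := by
  have hm : h ∈ PySem.List.sorted (PySem.Set.ofList xs) (fun x => x) true := by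
    rw [hs]; simp
  rw [PySem.List.mem_sorted, PySem.Set.mem_ofList] at hm
  exact ⟨hm, fun y hy => PySem.List.key_head_sorted_rev_ge _ _ hs y ((PySem.Set.mem_ofList _ _).mpr hy)⟩

-- … and the second element (if any) is the maximum of the values strictly below the head
theorem pv_sorted_second (xs : List Int) (h l : Int) (t : List Int)
    (hs : PySem.List.sorted (PySem.Set.ofList xs) (fun x => x) true = h :: l :: t) :
    l ∈ xs ∧ l < h ∧ ∀ y ∈ xs, y < h → y ≤ l := by
  have hpw : (h :: l :: t).Pairwise (fun a b => (fun x : Int => x) b ≤ (fun x : Int => x) a) := by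
    rw [← hs]; exact PySem.List.sorted_pairwise_rev ..
  have hnd : (h :: l :: t).Nodup := by
    rw [← hs]
    exact ((PySem.List.sorted_perm ..).nodup_iff).mpr (PySem.Set.nodup_ofList ..)
  have hlh : l ≤ h := by
    have := (List.pairwise_cons.1 hpw).1 l (by simp)
    simpa using this
  have hne : h ≠ l := by
    have h1 := (List.nodup_cons.1 hnd).1
    intro e; apply h1; rw [e]; simp
  have hlm : l ∈ xs := by
    have hm : l ∈ PySem.List.sorted (PySem.Set.ofList xs) (fun x => x) true := by
      rw [hs]; simp
    rwa [PySem.List.mem_sorted, PySem.Set.mem_ofList] at hm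
  refine ⟨hlm, lt_of_le_of_ne hlh (Ne.symm hne), fun y hy hylt => ?_⟩
  have hym : y ∈ h :: l :: t := by
    have hm : y ∈ PySem.List.sorted (PySem.Set.ofList xs) (fun x => x) true := by
      rw [PySem.List.mem_sorted, PySem.Set.mem_ofList]; exact hy
    rwa [hs] at hm
  rcases List.mem_cons.1 hym with e | hym'
  · omega
  rcases List.mem_cons.1 hym' with e | hyt
  · omega
  · have := (List.pairwise_cons.1 (List.pairwise_cons.1 hpw).2).1 y hyt
    simpa using this

theorem pv_sorted_single (xs : List Int) (h : Int)
    (hs : PySem.List.sorted (PySem.Set.ofList xs) (fun x => x) true = [h]) :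
    ∀ y ∈ xs, y = h := by
  intro y hy
  have hm : y ∈ PySem.List.sorted (PySem.Set.ofList xs) (fun x => x) true := by
    rw [PySem.List.mem_sorted, PySem.Set.mem_ofList]; exact hy
  rw [hs] at hm; simpa using hm

-- ===== VERDICT (by name: the statement is the Claim_ definition above) =====
theorem score_maki_for_player_spec : Claim_equal_score_maki_for_player := by
  intro my xs pc _hdom
  show score_maki_for_player my xs pc = score_maki_for_player_alt my xs pc
  rcases eq_or_ne xs [] with hxs | hxs
  · subst hxs; rfl
  obtain ⟨H, hn, lo, ln, nz, hst, hH, hmax, hcnt, hlo, hnz⟩ := pv_fold_inv xs hxs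
  have hBdef : score_maki_for_player_alt my xs pc =
      (if !nz then (0:Int) else
        if my == H then PySem.Int.floordiv (if pc == 2 then 4 else 6) hn
        else lo.elim (0:Int) (fun l => if my == l then PySem.Int.floordiv (if pc == 2 then 2 else 3) ln else 0)) := by
    unfold score_maki_for_player_alt
    rw [hst]
    cases lo <;> rfl
  by_cases hz : (xs.all fun m => m == 0) = true
  · have hA : score_maki_for_player my xs pc = 0 := by
      unfold score_maki_for_player; rw [if_pos hz]
    have hnzf : nz = false := by
      rw [hnz]
      simp only [List.any_eq_false]
      intro m hm
      have := List.all_eq_true.1 hz m hm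
      simpa using this
    rw [hA, hBdef, hnzf]
    try rfl
  · have hnzt : nz = true := by
      rw [hnz, List.any_eq_true]
      by_contra hno
      push Not at hno
      apply hz
      rw [List.all_eq_true]
      intro m hm
      have := hno m hm
      simpa using this
    rcases e : PySem.List.sorted (PySem.Set.ofList xs) (fun x => x) true with _ | ⟨h, t⟩
    · exfalso
      have hHm : H ∈ PySem.List.sorted (PySem.Set.ofList xs) (fun x => x) true := by
        rw [PySem.List.mem_sorted, PySem.Set.mem_ofList]; exact hH
      rw [e] at hHm; simp at hHm
    obtain ⟨hhm, hhmax⟩ := pv_sorted_head xs h t e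
    have hHh : H = h := le_antisymm (hhmax H hH) (hmax h hhm)
    subst hHh
    have hB2 : score_maki_for_player_alt my xs pc =
        (if my == H then PySem.Int.floordiv (if pc == 2 then 4 else 6) hn
         else lo.elim (0:Int) (fun l => if my == l then PySem.Int.floordiv (if pc == 2 then 2 else 3) ln else 0)) := by
      rw [hBdef, hnzt]
      try rfl
    have hAdef : score_maki_for_player my xs pc =
        (if my == H then PySem.Int.floordiv (if pc == 2 then 4 else 6) ((xs.filter fun m => m == H).length : Int)
         else t.head?.elim (0:Int) (fun second => if my == second then PySem.Int.floordiv (if pc == 2 then 2 else 3) ((xs.filter fun m => m == second).length : Int) else 0)) := by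
      unfold score_maki_for_player
      rw [if_neg hz]
      simp only [e]
      cases t <;> rfl
    have hcntfl : ∀ v : Int, ((xs.filter fun m => m == v).length : Int) = (xs.count v : Int) := by
      intro v; rw [List.count_eq_countP, List.countP_eq_length_filter]
    rw [hAdef, hB2, hcntfl H, ← hcnt]
    by_cases hmh : (my == H) = true
    · rw [if_pos hmh, if_pos hmh]
    · rw [if_neg hmh, if_neg hmh]
      cases t with
      | nil =>
        have hall := pv_sorted_single xs H e
        match lo, hlo with
        | none, _ => rfl
        | some L, ⟨hL, hLlt, _, _⟩ =>
          exact absurd (hall L hL) (by omega)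
      | cons l t' =>
        obtain ⟨hlm, hlh, hlmax⟩ := pv_sorted_second xs H l t' e
        match lo, hlo with
        | none, hlo' => exact absurd hlh (hlo' l hlm)
        | some L, ⟨hL, hLlt, hLmax, hLcnt⟩ =>
          have hLl : L = l := le_antisymm (hlmax L hL hLlt) (hLmax l hlm hlh)
          subst hLl
          dsimp only [List.head?, Option.elim]
          rw [hcntfl L, ← hLcnt]
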